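-- pv_equiv track=rewrite | github.com/hwanJP/kstat | backend/app/api/survey.py | calculate_current_step
-- ===== SOURCE A (Python) =====
-- from typing import Optional, List, Dict, Any
--
-- def calculate_current_step(executed_nodes: List[str]) -> int:
--     """실행된 노드를 기반으로 현재 단계 계산"""
--     step_mapping = {
--         1: ["set_survey_objective"],
--         2: ["select_database"],
--         3: ["set_survey_areas", "review_area_structure"],
--         4: ["set_detailed_items", "review_detailed_items_structure"],
--         5: ["set_layout_composition"],
--         6: ["generate_and_review_survey", "finalize_and_refine_survey", "create_draft"]
--     }
--
--     current_step = 1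
--     for step, nodes in step_mapping.items():
--         if any(node in executed_nodes for node in nodes):
--             current_step = step
--
--     return current_step
-- ===== SOURCE B (Python) =====
-- from typing import Optional, List, Dict, Any
--
-- def _node_step(node: str) -> int:
--     """Step number of a single node; 0 if the node is not part of any step."""
--     if node == "set_survey_objective":
--         return 1
--     elif node == "select_database":
--         return 2
--     elif node == "set_survey_areas" or node == "review_area_structure":
--         return 3
--     elif node == "set_detailed_items" or node == "review_detailed_items_structure":
--         return 4
--     elif node == "set_layout_composition":
--         return 5
--     elif node in ("generate_and_review_survey", "finalize_and_refine_survey", "create_draft"):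
--         return 6
--     else:
--         return 0
--
-- def calculate_current_step(executed_nodes: List[str]) -> int:
--     """실행된 노드를 기반으로 현재 단계 계산"""
--     best = 1
--     for n in executed_nodes:
--         s = _node_step(n)
--         if best < s:
--             best = s
--     return best
-- ===== Notes on version B (the rewrite author's own statement) =====
-- stated objective: alternative
-- what changed: Replaces the loop over the six steps (each scanning executed_nodes) by a single pass over executed_nodes with a per-node step classifier (if/elif chain) and a running maximum starting at 1.
import Mathlib
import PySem

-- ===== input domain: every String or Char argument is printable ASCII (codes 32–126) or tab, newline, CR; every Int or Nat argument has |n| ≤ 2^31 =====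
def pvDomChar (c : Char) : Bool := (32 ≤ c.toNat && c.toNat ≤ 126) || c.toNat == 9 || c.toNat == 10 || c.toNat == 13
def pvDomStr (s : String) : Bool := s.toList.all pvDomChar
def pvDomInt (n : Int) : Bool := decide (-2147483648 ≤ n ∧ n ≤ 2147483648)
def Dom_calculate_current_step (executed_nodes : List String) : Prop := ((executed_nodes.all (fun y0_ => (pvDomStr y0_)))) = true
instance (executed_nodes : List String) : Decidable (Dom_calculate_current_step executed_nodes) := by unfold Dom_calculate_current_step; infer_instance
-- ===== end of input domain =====

-- B replaces A's loop over the six steps (each scanning executed_nodes) by a single pass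
-- over executed_nodes with a per-node step classifier and a running maximum (objective: alternative).

-- ===== PORT A =====
def stepMappingA : List (Int × List String) :=
  [ (1, ["set_survey_objective"]),
    (2, ["select_database"]),
    (3, ["set_survey_areas", "review_area_structure"]),
    (4, ["set_detailed_items", "review_detailed_items_structure"]),
    (5, ["set_layout_composition"]),
    (6, ["generate_and_review_survey", "finalize_and_refine_survey", "create_draft"]) ]

def calculate_current_step (executed_nodes : List String) : Int :=
  stepMappingA.foldl
    (fun current_step p =>
      if p.2.any (fun node => executed_nodes.contains node) then p.1 else current_step)
    1

-- ===== PORT B =====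
-- _node_step: if/elif chain classifying one node (0 = not part of any step)
def nodeStep (node : String) : Int :=
  if node == "set_survey_objective" then 1
  else if node == "select_database" then 2
  else if node == "set_survey_areas" || node == "review_area_structure" then 3
  else if node == "set_detailed_items" || node == "review_detailed_items_structure" then 4
  else if node == "set_layout_composition" then 5
  else if node == "generate_and_review_survey" || node == "finalize_and_refine_survey" || node == "create_draft" then 6
  else 0

def calculate_current_step_alt (executed_nodes : List String) : Int :=
  executed_nodes.foldl
    (fun best n => let s := nodeStep n; if best < s then s else best)
    1

-- ===== PRECONDITION & SPEC =====
def Spec_calculate_current_step (executed_nodes : List String) (out : Int) : Prop := out = calculate_current_step_alt executed_nodes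
instance (executed_nodes : List String) (out : Int) : Decidable (Spec_calculate_current_step executed_nodes out) := by unfold Spec_calculate_current_step; infer_instance

-- ===== CLAIM (what is proved, stated in full; the proofs are below) =====
def Claim_equal_calculate_current_step : Prop := ∀ (executed_nodes : List String), Dom_calculate_current_step executed_nodes → Spec_calculate_current_step executed_nodes (calculate_current_step executed_nodes)

-- ===== LEMMAS AND PROOFS =====

-- result of A as a nested conditional over the six "some node of step i was executed" bits
def fstep (b1 b2 b3 b4 b5 b6 : Bool) : Int :=
  if b6 then 6 else if b5 then 5 else if b4 then 4 else if b3 then 3 else if b2 then 2 else if b1 then 1 else 1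

def d1 (e : List String) : Bool := e.any (fun n => n == "set_survey_objective")
def d2 (e : List String) : Bool := e.any (fun n => n == "select_database")
def d3 (e : List String) : Bool := e.any (fun n => n == "set_survey_areas" || n == "review_area_structure")
def d4 (e : List String) : Bool := e.any (fun n => n == "set_detailed_items" || n == "review_detailed_items_structure")
def d5 (e : List String) : Bool := e.any (fun n => n == "set_layout_composition")
def d6 (e : List String) : Bool := e.any (fun n => n == "generate_and_review_survey" || n == "finalize_and_refine_survey" || n == "create_draft")

lemma one_le_fstep (b1 b2 b3 b4 b5 b6 : Bool) : 1 ≤ fstep b1 b2 b3 b4 b5 b6 := by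
  unfold fstep; split_ifs <;> omega

lemma fstep_or1 (b1 b2 b3 b4 b5 b6 : Bool) :
    max 1 (fstep b1 b2 b3 b4 b5 b6) = fstep true b2 b3 b4 b5 b6 := by revert b1 b2 b3 b4 b5 b6; decide

lemma fstep_or2 (b1 b2 b3 b4 b5 b6 : Bool) :
    max 2 (fstep b1 b2 b3 b4 b5 b6) = fstep b1 true b3 b4 b5 b6 := by revert b1 b2 b3 b4 b5 b6; decide

lemma fstep_or3 (b1 b2 b3 b4 b5 b6 : Bool) :
    max 3 (fstep b1 b2 b3 b4 b5 b6) = fstep b1 b2 true b4 b5 b6 := by revert b1 b2 b3 b4 b5 b6; decide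

lemma fstep_or4 (b1 b2 b3 b4 b5 b6 : Bool) :
    max 4 (fstep b1 b2 b3 b4 b5 b6) = fstep b1 b2 b3 true b5 b6 := by revert b1 b2 b3 b4 b5 b6; decide

lemma fstep_or5 (b1 b2 b3 b4 b5 b6 : Bool) :
    max 5 (fstep b1 b2 b3 b4 b5 b6) = fstep b1 b2 b3 b4 true b6 := by revert b1 b2 b3 b4 b5 b6; decide

lemma fstep_or6 (b1 b2 b3 b4 b5 b6 : Bool) :
    max 6 (fstep b1 b2 b3 b4 b5 b6) = fstep b1 b2 b3 b4 b5 true := by revert b1 b2 b3 b4 b5 b6; decide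

lemma any_eq_contains (a : String) (e : List String) :
    e.any (fun n => n == a) = e.contains a := by
  rw [Bool.eq_iff_iff]
  simp [List.any_eq_true]

lemma any_or (p q : String → Bool) (e : List String) :
    e.any (fun n => p n || q n) = (e.any p || e.any q) := by
  induction e with
  | nil => rfl
  | cons x t ih =>
    simp only [List.any_cons, ih]
    cases p x <;> cases q x <;> simp

lemma A_eq (e : List String) :
    calculate_current_step e = fstep (d1 e) (d2 e) (d3 e) (d4 e) (d5 e) (d6 e) := by
  simp only [calculate_current_step, stepMappingA, List.foldl, fstep,
    d1, d2, d3, d4, d5, d6, List.any_cons, List.any_nil, Bool.or_false, any_or,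
    any_eq_contains, Bool.or_assoc]

lemma upd_eq_max (a s : Int) : (if a < s then s else a) = max a s := by
  split_ifs <;> omega

lemma core (e : List String) : ∀ acc : Int, 1 ≤ acc →
    e.foldl (fun best n => let s := nodeStep n; if best < s then s else best) acc
      = max acc (fstep (d1 e) (d2 e) (d3 e) (d4 e) (d5 e) (d6 e)) := by
  induction e with
  | nil =>
    intro acc hacc
    simp [fstep, d1, d2, d3, d4, d5, d6]
    omega
  | cons n t ih =>
    intro acc hacc
    simp only [List.foldl_cons]
    by_cases h1 : n = "set_survey_objective"
    · subst h1
      rw [show nodeStep "set_survey_objective" = 1 from rfl, upd_eq_max,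
        ih (max acc 1) (by omega)]
      simp only [d1, d2, d3, d4, d5, d6, List.any_cons]
      simp
      rw [fstep_or1]
    by_cases h2 : n = "select_database"
    · subst h2
      rw [show nodeStep "select_database" = 2 from rfl, upd_eq_max,
        ih (max acc 2) (by omega)]
      simp only [d1, d2, d3, d4, d5, d6, List.any_cons]
      simp
      rw [fstep_or2]
    by_cases h3 : n = "set_survey_areas"
    · subst h3
      rw [show nodeStep "set_survey_areas" = 3 from rfl, upd_eq_max,
        ih (max acc 3) (by omega)]
      simp only [d1, d2, d3, d4, d5, d6, List.any_cons]
      simp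
      rw [fstep_or3]
    by_cases h4 : n = "review_area_structure"
    · subst h4
      rw [show nodeStep "review_area_structure" = 3 from rfl, upd_eq_max,
        ih (max acc 3) (by omega)]
      simp only [d1, d2, d3, d4, d5, d6, List.any_cons]
      simp
      rw [fstep_or3]
    by_cases h5 : n = "set_detailed_items"
    · subst h5
      rw [show nodeStep "set_detailed_items" = 4 from rfl, upd_eq_max,
        ih (max acc 4) (by omega)]
      simp only [d1, d2, d3, d4, d5, d6, List.any_cons]
      simp
      rw [fstep_or4]
    by_cases h6 : n = "review_detailed_items_structure"
    · subst h6
      rw [show nodeStep "review_detailed_items_structure" = 4 from rfl, upd_eq_max,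
        ih (max acc 4) (by omega)]
      simp only [d1, d2, d3, d4, d5, d6, List.any_cons]
      simp
      rw [fstep_or4]
    by_cases h7 : n = "set_layout_composition"
    · subst h7
      rw [show nodeStep "set_layout_composition" = 5 from rfl, upd_eq_max,
        ih (max acc 5) (by omega)]
      simp only [d1, d2, d3, d4, d5, d6, List.any_cons]
      simp
      rw [fstep_or5]
    by_cases h8 : n = "generate_and_review_survey"
    · subst h8
      rw [show nodeStep "generate_and_review_survey" = 6 from rfl, upd_eq_max,
        ih (max acc 6) (by omega)]
      simp only [d1, d2, d3, d4, d5, d6, List.any_cons]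
      simp
      rw [fstep_or6]
    by_cases h9 : n = "finalize_and_refine_survey"
    · subst h9
      rw [show nodeStep "finalize_and_refine_survey" = 6 from rfl, upd_eq_max,
        ih (max acc 6) (by omega)]
      simp only [d1, d2, d3, d4, d5, d6, List.any_cons]
      simp
      rw [fstep_or6]
    by_cases h10 : n = "create_draft"
    · subst h10
      rw [show nodeStep "create_draft" = 6 from rfl, upd_eq_max,
        ih (max acc 6) (by omega)]
      simp only [d1, d2, d3, d4, d5, d6, List.any_cons]
      simp
      rw [fstep_or6]
    · have e1 : (n == "set_survey_objective") = false := beq_eq_false_iff_ne.mpr h1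
      have e2 : (n == "select_database") = false := beq_eq_false_iff_ne.mpr h2
      have e3 : (n == "set_survey_areas") = false := beq_eq_false_iff_ne.mpr h3
      have e4 : (n == "review_area_structure") = false := beq_eq_false_iff_ne.mpr h4
      have e5 : (n == "set_detailed_items") = false := beq_eq_false_iff_ne.mpr h5
      have e6 : (n == "review_detailed_items_structure") = false := beq_eq_false_iff_ne.mpr h6
      have e7 : (n == "set_layout_composition") = false := beq_eq_false_iff_ne.mpr h7
      have e8 : (n == "generate_and_review_survey") = false := beq_eq_false_iff_ne.mpr h8
      have e9 : (n == "finalize_and_refine_survey") = false := beq_eq_false_iff_ne.mpr h9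
      have e10 : (n == "create_draft") = false := beq_eq_false_iff_ne.mpr h10
      have hns : nodeStep n = 0 := by
        simp [nodeStep, e1, e2, e3, e4, e5, e6, e7, e8, e9, e10]
      rw [hns, show (if acc < (0:Int) then (0:Int) else acc) = acc by split_ifs <;> omega,
        ih acc hacc]
      simp only [d1, d2, d3, d4, d5, d6, List.any_cons, e1, e2, e3, e4, e5, e6, e7, e8, e9, e10,
        Bool.false_or]

lemma B_eq (e : List String) :
    calculate_current_step_alt e = fstep (d1 e) (d2 e) (d3 e) (d4 e) (d5 e) (d6 e) := by
  unfold calculate_current_step_alt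
  rw [core e 1 (by omega)]
  have h1 := one_le_fstep (d1 e) (d2 e) (d3 e) (d4 e) (d5 e) (d6 e)
  omega

-- ===== VERDICT (by name: the statement is the Claim_ definition above) =====
theorem calculate_current_step_spec : Claim_equal_calculate_current_step := by
  intro e _
  unfold Spec_calculate_current_step
  rw [A_eq, B_eq]
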